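-- pv_equiv track=rewrite | github.com/adutoi/Qode | qode/util/external/TonyUtil/util/misc/looper.py | compound_range
-- ===== SOURCE A (Python) =====
-- def compound_range(dims, inactive=None):
--     """ returns a list, in which each element is itself a list representing a successive value of a compound index """
--     # dims     is a list whose elements are each an iterable (like a range object) that yields the values that
--     #          that each respective component of the compound index can take on.
--     # inactive is a list that positionally indicates components of the returned compound indices that are not
--     #          iterated over.  Their values are replaced by None in the returned list of compound values.
--     if inactive is None:  inactive = []
--     values = [[]]
--     for i,d in reversed(list(enumerate(dims))):
--         if i in inactive:
--             values = [[None]+v for v in values]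
--         else:
--             new_values = []
--             for j in d:
--                 new_values += [[j]+v for v in values]
--             values = new_values
--     return values
-- ===== SOURCE B (Python) =====
-- def compound_range(dims, inactive=None):
--     """ returns a list, in which each element is itself a list representing a successive value of a compound index """
--     if inactive is None:
--         inactive = []
--     active = [i for i in range(len(dims)) if i not in inactive]
--     combos = [()]
--     for i in active:
--         combos = [c + (j,) for c in combos for j in dims[i]]
--     result = []
--     for c in combos:
--         row = []
--         k = 0
--         for i in range(len(dims)):
--             if i in inactive:
--                 row.append(None)
--             else:
--                 row.append(c[k])
--                 k += 1
--         result.append(row)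
--     return result
-- ===== Notes on version B (the rewrite author's own statement) =====
-- stated objective: alternative
-- what changed: B splits the work into two passes: it builds the Cartesian product of only the active dimensions by a left fold with append, then assembles each full row in a second pass that inserts None at inactive positions, instead of A's right-to-left fold that prepends and interleaves None-insertion with product construction.
import Mathlib
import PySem

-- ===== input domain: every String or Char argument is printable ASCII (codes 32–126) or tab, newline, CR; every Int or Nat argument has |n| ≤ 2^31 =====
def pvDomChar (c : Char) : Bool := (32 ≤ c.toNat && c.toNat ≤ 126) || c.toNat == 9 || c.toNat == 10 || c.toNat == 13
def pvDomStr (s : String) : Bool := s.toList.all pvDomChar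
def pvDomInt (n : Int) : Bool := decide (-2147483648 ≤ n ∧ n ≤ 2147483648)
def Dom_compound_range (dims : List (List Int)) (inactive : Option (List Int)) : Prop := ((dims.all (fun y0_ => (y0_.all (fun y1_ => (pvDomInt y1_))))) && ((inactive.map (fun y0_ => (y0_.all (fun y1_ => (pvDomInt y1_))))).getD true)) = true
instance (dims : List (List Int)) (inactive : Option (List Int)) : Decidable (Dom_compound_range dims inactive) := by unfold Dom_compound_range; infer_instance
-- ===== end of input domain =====

-- B builds the product of the active dimensions first, then inserts None in a second assembly
-- pass; A interleaves None-insertion with a right-to-left prepend fold.  Objective: alternative.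

-- ===== PORT A =====
-- 'values = [[]]; for i,d in reversed(list(enumerate(dims))): …'
def compound_range (dims : List (List Int)) (inactive : Option (List Int)) : List (List (Option Int)) :=
  let inact := inactive.getD []
  (PySem.List.enumerate dims 0).reverse.foldl
    (fun values p =>
      if p.1 ∈ inact then
        values.map (fun v => none :: v)
      else
        p.2.foldl (fun nv j => nv ++ values.map (fun v => some j :: v)) [])
    [[]]

-- ===== PORT B =====
-- 'active = [i for i in range(len(dims)) if i not in inactive]'; then a left fold building the
-- product of the active dimensions; then per-combo assembly with a consumed-counter k.
-- dims[i] and c[k] are always in range here, so pyGetD with a dummy default is exact.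
def compound_range_alt (dims : List (List Int)) (inactive : Option (List Int)) : List (List (Option Int)) :=
  let inact := inactive.getD []
  let active := (PySem.List.pyRange 0 (dims.length : Int) 1).filter (fun i => decide (i ∉ inact))
  let combos := active.foldl
    (fun cs i => cs.flatMap (fun c => (PySem.List.pyGetD dims i []).map (fun j => c ++ [j]))) [[]]
  combos.map (fun c =>
    ((PySem.List.pyRange 0 (dims.length : Int) 1).foldl
      (fun st i =>
        if i ∈ inact then (st.1 ++ [(none : Option Int)], st.2)
        else (st.1 ++ [some (PySem.List.pyGetD c st.2 0)], st.2 + 1))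
      ([], (0 : Int))).1)

-- ===== PRECONDITION & SPEC =====
def Spec_compound_range (dims : List (List Int)) (inactive : Option (List Int)) (out : List (List (Option Int))) : Prop := out = compound_range_alt dims inactive
instance (dims : List (List Int)) (inactive : Option (List Int)) (out : List (List (Option Int))) : Decidable (Spec_compound_range dims inactive out) := by unfold Spec_compound_range; infer_instance

-- ===== CLAIM (what is proved, stated in full; the proofs are below) =====
def Claim_equal_compound_range : Prop := ∀ (dims : List (List Int)) (inactive : Option (List Int)), Dom_compound_range dims inactive → Spec_compound_range dims inactive (compound_range dims inactive)

-- ===== LEMMAS AND PROOFS =====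

-- common specification: recursion over dims carrying the absolute position s
def crSpec (inact : List Int) : Int → List (List Int) → List (List (Option Int))
  | _, [] => [[]]
  | s, d :: rest =>
    if s ∈ inact then (crSpec inact (s+1) rest).map (fun v => none :: v)
    else d.flatMap (fun j => (crSpec inact (s+1) rest).map (fun v => some j :: v))

-- the dimensions at active positions, from position s
def actDims (inact : List Int) : Int → List (List Int) → List (List Int)
  | _, [] => []
  | s, d :: rest =>
    if s ∈ inact then actDims inact (s+1) rest else d :: actDims inact (s+1) rest

-- right-nested Cartesian product
def prodR : List (List Int) → List (List Int)
  | [] => [[]]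
  | d :: ds => d.flatMap (fun j => (prodR ds).map (fun v => j :: v))

-- consuming assembler: m positions left, starting at position s, components left in c
def asmC (inact : List Int) : Int → Nat → List Int → List (Option Int)
  | _, 0, _ => []
  | s, m+1, c =>
    if s ∈ inact then none :: asmC inact (s+1) m c
    else some (c.headD 0) :: asmC inact (s+1) m c.tail

-- indexed assembler matching B's fold state (k = components consumed so far)
def asmI (inact : List Int) (c : List Int) : Int → Nat → Int → List (Option Int)
  | _, 0, _ => []
  | s, m+1, k =>
    if s ∈ inact then none :: asmI inact c (s+1) m k
    else some (PySem.List.pyGetD c k 0) :: asmI inact c (s+1) m (k+1)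

-- ===== A = crSpec =====
theorem a_eq_crSpec (inact : List Int) (dims : List (List Int)) (s : Int) :
    (PySem.List.enumerate dims s).foldr
      (fun p values =>
        if p.1 ∈ inact then values.map (fun v => (none : Option Int) :: v)
        else p.2.foldl (fun nv j => nv ++ values.map (fun v => some j :: v)) [])
      [[]] = crSpec inact s dims := by
  induction dims generalizing s with
  | nil => simp [PySem.List.enumerate_nil, crSpec]
  | cons d rest ih =>
    simp only [PySem.List.enumerate_cons, List.foldr_cons, ih, crSpec]
    by_cases h : s ∈ inact
    · simp [h]
    · simp [h, List.flatMap_def]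

-- ===== B pieces =====
theorem filter_map_enumerate (inact : List Int) (dims : List (List Int)) (s : Int) :
    (((PySem.List.enumerate dims s).filter (fun p => !decide (p.1 ∈ inact))).map (·.2))
      = actDims inact s dims := by
  induction dims generalizing s with
  | nil => simp [PySem.List.enumerate_nil, actDims]
  | cons d rest ih =>
    simp only [PySem.List.enumerate_cons, List.filter_cons, actDims]
    by_cases h : s ∈ inact
    · simp [h, ih]
    · simp [h, ih]

theorem foldl_prod (f : Int → List Int) (l : List Int) (acc : List (List Int)) :
    l.foldl (fun cs i => cs.flatMap (fun c => (f i).map (fun j => c ++ [j]))) acc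
      = acc.flatMap (fun c => (prodR (l.map f)).map (fun v => c ++ v)) := by
  induction l generalizing acc with
  | nil => simp [prodR]
  | cons i l ih =>
    simp only [List.foldl_cons, ih, List.map_cons, prodR]
    rw [List.flatMap_assoc]
    apply List.flatMap_congr; intro c _
    rw [List.flatMap_map, List.map_flatMap]
    apply List.flatMap_congr; intro a _
    simp [List.map_map, Function.comp_def, List.append_assoc]

-- fold state invariant for B's assembly loop
theorem foldl_asmI (inact : List Int) (c : List Int) (m : Nat) :
    ∀ (s : Int) (row : List (Option Int)) (k : Int),
    ((PySem.List.pyRange s (s + (m : Int)) 1).foldl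
      (fun st i =>
        if i ∈ inact then (st.1 ++ [(none : Option Int)], st.2)
        else (st.1 ++ [some (PySem.List.pyGetD c st.2 0)], st.2 + 1))
      (row, k)).1 = row ++ asmI inact c s m k := by
  induction m with
  | zero => intro s row k; simp [asmI]
  | succ m ih =>
    intro s row k
    rw [show s + ((m+1 : Nat) : Int) = (s+1) + (m : Int) by push_cast; ring] at *
    rw [PySem.List.pyRange_one_cons (by omega : s < (s+1) + (m : Int))]
    simp only [List.foldl_cons, asmI]
    by_cases h : s ∈ inact
    · simp only [h, if_pos, ih, List.append_assoc, List.singleton_append]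
    · simp only [h, if_false, ih, List.append_assoc, List.singleton_append]

theorem asmI_eq_asmC (inact : List Int) (c : List Int) (m : Nat) :
    ∀ (s : Int) (k : Nat), asmI inact c s m (k : Int) = asmC inact s m (c.drop k) := by
  induction m with
  | zero => intro s k; simp [asmI, asmC]
  | succ m ih =>
    intro s k
    simp only [asmI, asmC]
    by_cases h : s ∈ inact
    · simp [h, ih]
    · have h1 : PySem.List.pyGetD c (k : Int) 0 = (c.drop k).headD 0 := by
        rw [PySem.List.pyGetD_natCast, List.getD_eq_getElem?_getD, ← List.head?_drop]
        cases (c.drop k) <;> rfl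
      have h2 : ((k : Int) + 1) = ((k+1 : Nat) : Int) := by push_cast; ring
      simp only [if_neg h]
      rw [h1, h2, ih, List.tail_drop]

-- crSpec as product-then-assemble
theorem crSpec_eq_prod_asm (inact : List Int) (dims : List (List Int)) :
    ∀ (s : Int), crSpec inact s dims
      = (prodR (actDims inact s dims)).map (fun c => asmC inact s dims.length c) := by
  induction dims with
  | nil => intro s; simp [crSpec, actDims, prodR, asmC]
  | cons d rest ih =>
    intro s
    simp only [crSpec, actDims, List.length_cons]
    by_cases h : s ∈ inact
    · simp only [h, if_pos, ih, List.map_map]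
      apply List.map_congr_left; intro c _
      show ((none : Option Int) :: asmC inact (s+1) rest.length c)
        = asmC inact s (rest.length+1) c
      rw [asmC]; simp [h]
    · simp only [h, if_false, prodR, ih, List.map_flatMap, List.map_map]
      apply List.flatMap_congr; intro j _
      apply List.map_congr_left; intro c _
      show (some j :: asmC inact (s+1) rest.length c : List (Option Int))
        = asmC inact s (rest.length+1) (j :: c)
      rw [asmC]; simp [h]

theorem a_side (inact : List Int) (dims : List (List Int)) :
    (PySem.List.enumerate dims 0).reverse.foldl
      (fun values p =>
        if p.1 ∈ inact then values.map (fun v => (none : Option Int) :: v)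
        else p.2.foldl (fun nv j => nv ++ values.map (fun v => some j :: v)) [])
      [[]] = crSpec inact 0 dims := by
  rw [List.foldl_reverse]
  exact a_eq_crSpec inact dims 0

theorem b_side (inact : List Int) (dims : List (List Int)) :
    ((((PySem.List.pyRange 0 (dims.length : Int) 1).filter (fun i => decide (i ∉ inact))).foldl
        (fun cs i => cs.flatMap (fun c => (PySem.List.pyGetD dims i []).map (fun j => c ++ [j]))) [[]]).map
      (fun c =>
        ((PySem.List.pyRange 0 (dims.length : Int) 1).foldl
          (fun st i =>
            if i ∈ inact then (st.1 ++ [(none : Option Int)], st.2)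
            else (st.1 ++ [some (PySem.List.pyGetD c st.2 0)], st.2 + 1))
          ([], (0 : Int))).1))
    = crSpec inact 0 dims := by
  have hact : ((PySem.List.pyRange 0 (dims.length : Int) 1).filter (fun i => decide (i ∉ inact))).map
      (fun i => PySem.List.pyGetD dims i []) = actDims inact 0 dims := by
    have h1 := filter_map_enumerate inact dims 0
    rw [PySem.List.enumerate_eq_map_pyRange dims [], List.filter_map, List.map_map] at h1
    simpa [Function.comp_def, decide_not] using h1
  have hcombos : (((PySem.List.pyRange 0 (dims.length : Int) 1).filter (fun i => decide (i ∉ inact))).foldl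
      (fun cs i => cs.flatMap (fun c => (PySem.List.pyGetD dims i []).map (fun j => c ++ [j]))) [[]])
      = prodR (actDims inact 0 dims) := by
    rw [foldl_prod (fun i => PySem.List.pyGetD dims i []), hact]
    simp
  rw [hcombos, crSpec_eq_prod_asm]
  apply List.map_congr_left; intro c _
  have h0 : ((PySem.List.pyRange 0 (dims.length : Int) 1).foldl
      (fun st i =>
        if i ∈ inact then (st.1 ++ [(none : Option Int)], st.2)
        else (st.1 ++ [some (PySem.List.pyGetD c st.2 0)], st.2 + 1))
      ([], (0 : Int))).1 = [] ++ asmI inact c 0 dims.length 0 := by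
    have := foldl_asmI inact c dims.length 0 [] 0
    rw [show (0 : Int) + (dims.length : Int) = (dims.length : Int) by ring] at this
    exact this
  rw [h0]
  have h2 := asmI_eq_asmC inact c dims.length 0 0
  simp only [Nat.cast_zero, List.drop_zero] at h2
  simp [h2]

-- ===== VERDICT (by name: the statement is the Claim_ definition above) =====
theorem compound_range_spec : Claim_equal_compound_range := by
  intro dims inactive _
  unfold Spec_compound_range
  show compound_range dims inactive = compound_range_alt dims inactive
  unfold compound_range compound_range_alt
  exact (a_side (inactive.getD []) dims).trans (b_side (inactive.getD []) dims).symm
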